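-- pv_equiv track=rewrite | github.com/HaeKang/algorithm_study | Python/BFSDFS/부대복귀.py | solution
-- ===== SOURCE A (Python) =====
-- from collections import deque
--
-- def solution(n, roads, sources, destination):
--     answer = []
--
--     checked = [-1 for _ in range(n+1)]
--     arr = [[] for _ in range(n+1)]
--
--     for a, b in roads:
--         arr[a].append(b)
--         arr[b].append(a)
--
--     q = deque()
--     q.append(destination)
--     checked[destination] = 0
--
--     while q:
--         node = q.popleft()
--
--         for next in arr[node]:
--             if checked[next] == -1:
--                 checked[next] = checked[node] + 1
--                 q.append(next)
--
--     for i in sources: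
--         answer.append(checked[i])
--
--     return answer
-- ===== SOURCE B (Python) =====
-- def solution(n, roads, sources, destination):
--     # Bellman-Ford-style fixpoint: repeatedly relax the raw edge list, one
--     # distance level per pass, until a pass changes nothing (no adjacency
--     # list, no queue/frontier).
--     checked = [-1] * (n + 1)
--     checked[destination] = 0
--     dist = 0
--     changed = True
--     while changed:
--         changed = False
--         for a, b in roads:
--             if checked[a] == dist and checked[b] == -1:
--                 checked[b] = dist + 1
--                 changed = True
--             if checked[b] == dist and checked[a] == -1:
--                 checked[a] = dist + 1
--                 changed = True
--         dist += 1
--     return [checked[i] for i in sources]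
-- ===== Notes on version B (the rewrite author's own statement) =====
-- stated objective: alternative
-- what changed: Replaces the adjacency-list + deque BFS with a Bellman-Ford-style fixpoint: no adjacency list and no queue are built; the raw edge list is rescanned once per distance level, relaxing edges incident to the current level, until a pass changes nothing.
import Mathlib
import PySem

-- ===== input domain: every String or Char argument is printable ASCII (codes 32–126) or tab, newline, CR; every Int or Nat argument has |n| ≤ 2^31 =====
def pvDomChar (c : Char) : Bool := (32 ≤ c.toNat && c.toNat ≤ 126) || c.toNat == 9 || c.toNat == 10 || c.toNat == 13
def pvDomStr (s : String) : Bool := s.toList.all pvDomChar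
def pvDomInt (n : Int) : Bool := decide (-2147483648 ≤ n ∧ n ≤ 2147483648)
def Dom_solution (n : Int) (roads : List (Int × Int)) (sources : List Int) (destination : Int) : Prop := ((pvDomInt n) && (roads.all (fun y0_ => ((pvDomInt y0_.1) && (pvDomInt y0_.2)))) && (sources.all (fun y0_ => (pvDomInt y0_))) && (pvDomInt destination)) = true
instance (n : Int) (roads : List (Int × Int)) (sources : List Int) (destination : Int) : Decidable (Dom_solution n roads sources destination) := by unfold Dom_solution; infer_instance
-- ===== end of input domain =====

-- B replaces A's adjacency-list + deque BFS by a Bellman-Ford-style fixpoint over the raw edge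
-- list (one pass per distance level until a pass changes nothing); equivalence is proved on Pre_
-- (in-range graph data, where Python A returns instead of raising IndexError).

-- ===== PORT A =====
-- A's inner statement: `if checked[next] == -1: checked[next] = checked[node] + 1; q.append(next)`
-- (the defaults of pyGetD/pySetD are only reached where Python would raise, outside Pre_)
def bfsVisit (node : Int) (st : List Int × List Int) (nb : Int) : List Int × List Int :=
  if PySem.List.pyGet? st.1 nb = some (-1) then
    (PySem.List.pySetD st.1 nb (PySem.List.pyGetD st.1 node 0 + 1), st.2 ++ [nb])
  else st

-- `arr[a].append(b); arr[b].append(a)` for one road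
def buildStep (ar : List (List Int)) (p : Int × Int) : List (List Int) :=
  PySem.List.pySetD (PySem.List.pySetD ar p.1 (PySem.List.pyGetD ar p.1 [] ++ [p.2])) p.2
    (PySem.List.pyGetD (PySem.List.pySetD ar p.1 (PySem.List.pyGetD ar p.1 [] ++ [p.2])) p.2 [] ++ [p.1])

-- termination bookkeeping for the BFS loop (invariant: every cell ≥ -1; measure: number of -1 cells)
def AllGE (c : List Int) : Prop := ∀ x ∈ c, -1 ≤ x
def negCnt (c : List Int) : Nat := c.countP (fun x => decide (x = -1))

theorem allGE_replicate (m : Nat) : AllGE (List.replicate m (-1)) := by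
  intro x hx
  have := List.eq_of_mem_replicate hx
  omega

theorem allGE_pySetD (xs : List Int) (i v : Int) (h : AllGE xs) (hv : -1 ≤ v) :
    AllGE (PySem.List.pySetD xs i v) := by
  unfold PySem.List.pySetD PySem.List.pySet?
  cases hk : PySem.List.pyIdx? xs.length i with
  | none => simpa using h
  | some k =>
    intro x hx
    simp at hx
    rcases List.mem_or_eq_of_mem_set hx with h1 | h1
    · exact h x h1
    · omega

theorem pySetD_of_pyGet {xs : List Int} {i w : Int} (v : Int)
    (h0 : PySem.List.pyGet? xs i = some w) :
    ∃ k, k < xs.length ∧ xs[k]? = some w ∧ PySem.List.pySetD xs i v = xs.set k v := by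
  unfold PySem.List.pyGet? at h0
  unfold PySem.List.pySetD PySem.List.pySet?
  cases hk : PySem.List.pyIdx? xs.length i with
  | none => rw [hk] at h0; simp at h0
  | some k =>
    rw [hk] at h0
    simp at h0 ⊢
    exact ⟨k, List.getElem?_eq_some_iff.mp h0 |>.1, h0, rfl⟩

theorem negCnt_set (xs : List Int) (k : Nat) (v : Int) :
    ∀ (_ : k < xs.length) (_ : xs[k]? = some (-1)) (_ : v ≠ -1),
    negCnt (xs.set k v) + 1 = negCnt xs := by
  induction xs generalizing k with
  | nil => intro hk; simp at hk
  | cons x xs ih =>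
    intro hk hx hv
    cases k with
    | zero =>
      simp at hx
      simp [negCnt, hx, hv]
    | succ k =>
      simp at hx hk
      have := ih k hk hx hv
      simp only [List.set_cons_succ, negCnt, List.countP_cons] at *
      omega

theorem pyGetD_ge (xs : List Int) (i : Int) (h : AllGE xs) : -1 ≤ PySem.List.pyGetD xs i 0 := by
  unfold PySem.List.pyGetD
  cases hg : PySem.List.pyGet? xs i with
  | none => norm_num
  | some w => exact h w (PySem.List.mem_of_pyGet?_eq_some _ hg)

theorem bfsVisit_inv (node : Int) (st : List Int × List Int) (nb : Int) (h : AllGE st.1) :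
    AllGE (bfsVisit node st nb).1 ∧
    negCnt (bfsVisit node st nb).1 + (bfsVisit node st nb).2.length = negCnt st.1 + st.2.length ∧
    negCnt (bfsVisit node st nb).1 ≤ negCnt st.1 := by
  unfold bfsVisit
  split
  · rename_i h0
    have hv : PySem.List.pyGetD st.1 node 0 + 1 ≠ -1 := by
      have := pyGetD_ge st.1 node h
      omega
    obtain ⟨k, hk, hxk, hset⟩ := pySetD_of_pyGet (PySem.List.pyGetD st.1 node 0 + 1) h0
    have hcnt := negCnt_set st.1 k _ hk hxk hv
    refine ⟨?_, ?_, ?_⟩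
    · exact allGE_pySetD _ _ _ h (by have := pyGetD_ge st.1 node h; omega)
    · simp only [hset, List.length_append, List.length_cons, List.length_nil]
      omega
    · simp only [hset]; omega
  · exact ⟨h, rfl, le_refl _⟩

theorem foldVisit_inv (node : Int) (nbrs : List Int) (st : List Int × List Int) (h : AllGE st.1) :
    AllGE (nbrs.foldl (bfsVisit node) st).1 ∧
    negCnt (nbrs.foldl (bfsVisit node) st).1 + (nbrs.foldl (bfsVisit node) st).2.length
      = negCnt st.1 + st.2.length ∧
    negCnt (nbrs.foldl (bfsVisit node) st).1 ≤ negCnt st.1 := by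
  induction nbrs generalizing st with
  | nil => exact ⟨h, rfl, le_refl _⟩
  | cons nb nbrs ih =>
    have h1 := bfsVisit_inv node st nb h
    have h2 := ih (bfsVisit node st nb) h1.1
    simp only [List.foldl_cons]
    exact ⟨h2.1, by omega, le_trans h2.2.2 h1.2.2⟩

-- A's while-loop over the FIFO queue (the deque is the second loop-state component; the Prop
-- argument only justifies termination and is erased)
def aloop (arr : List (List Int)) (c : List Int) (q : List Int) (h : AllGE c) : List Int :=
  match q with
  | [] => c
  | node :: rest =>
    let st := (PySem.List.pyGetD arr node []).foldl (bfsVisit node) (c, rest)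
    aloop arr st.1 st.2 (foldVisit_inv node _ (c, rest) h).1
termination_by (negCnt c, q.length)
decreasing_by
  have h2 := (foldVisit_inv node (PySem.List.pyGetD arr node []) (c, rest) h).2
  dsimp only at h2 ⊢
  simp only [List.length_cons] at h2 ⊢
  rcases Nat.lt_or_ge (negCnt ((PySem.List.pyGetD arr node []).foldl (bfsVisit node) (c, rest)).1) (negCnt c) with hlt | hge
  · exact Prod.Lex.left _ _ hlt
  · have heq : negCnt ((PySem.List.pyGetD arr node []).foldl (bfsVisit node) (c, rest)).1 = negCnt c := le_antisymm h2.2 hge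
    rw [heq]
    exact Prod.Lex.right _ (by omega)

def solution (n : Int) (roads : List (Int × Int)) (sources : List Int) (destination : Int) : List Int :=
  let checked := List.replicate (n + 1).toNat (-1 : Int)
  let arr := List.replicate (n + 1).toNat ([] : List Int)
  let arr := roads.foldl buildStep arr
  let checked := PySem.List.pySetD checked destination 0
  let checked := aloop arr checked [destination]
    (allGE_pySetD _ _ _ (allGE_replicate _) (by norm_num))
  sources.map (fun i => PySem.List.pyGetD checked i 0)

-- ===== PORT B =====
-- one edge of one pass: the two sequential ifs of B's inner loop
-- (`checked[x]` reads raise on out-of-range x, hence the pyGet?-equality guards)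
def relax (d : Int) (st : List Int × Bool) (a b : Int) : List Int × Bool :=
  if PySem.List.pyGet? st.1 a = some d ∧ PySem.List.pyGet? st.1 b = some (-1)
  then (PySem.List.pySetD st.1 b (d + 1), true) else st

def bedge (d : Int) (st : List Int × Bool) (e : Int × Int) : List Int × Bool :=
  relax d (relax d st e.1 e.2) e.2 e.1

-- termination bookkeeping for B's while-loop: each write flips a -1 cell to d+1
theorem relax_negCnt (d : Int) (st : List Int × Bool) (a b : Int) (hd : 0 ≤ d) :
    negCnt (relax d st a b).1 ≤ negCnt st.1 ∧
    ((relax d st a b).2 = true → st.2 = true ∨ negCnt (relax d st a b).1 < negCnt st.1) := by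
  unfold relax
  split
  · rename_i h1
    obtain ⟨k, hk, hxk, hset⟩ := pySetD_of_pyGet (d + 1) h1.2
    have := negCnt_set st.1 k (d + 1) hk hxk (by omega)
    simp only [hset]
    exact ⟨by omega, fun _ => Or.inr (by omega)⟩
  · exact ⟨le_refl _, fun h => Or.inl h⟩

theorem bedge_negCnt (d : Int) (st : List Int × Bool) (e : Int × Int) (hd : 0 ≤ d) :
    negCnt (bedge d st e).1 ≤ negCnt st.1 ∧
    ((bedge d st e).2 = true → st.2 = true ∨ negCnt (bedge d st e).1 < negCnt st.1) := by
  unfold bedge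
  have h1 := relax_negCnt d st e.1 e.2 hd
  have h2 := relax_negCnt d (relax d st e.1 e.2) e.2 e.1 hd
  refine ⟨le_trans h2.1 h1.1, fun h => ?_⟩
  rcases h2.2 h with h3 | h3
  · rcases h1.2 h3 with h4 | h4
    · exact Or.inl h4
    · exact Or.inr (lt_of_le_of_lt h2.1 h4)
  · exact Or.inr (lt_of_lt_of_le h3 h1.1)

def bpass (d : Int) (roads : List (Int × Int)) (c : List Int) : List Int × Bool :=
  roads.foldl (bedge d) (c, false)

theorem bpass_negCnt (d : Int) (roads : List (Int × Int)) (st : List Int × Bool) (hd : 0 ≤ d) :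
    negCnt (roads.foldl (bedge d) st).1 ≤ negCnt st.1 ∧
    ((roads.foldl (bedge d) st).2 = true → st.2 = true ∨ negCnt (roads.foldl (bedge d) st).1 < negCnt st.1) := by
  induction roads generalizing st with
  | nil => exact ⟨le_refl _, fun h => Or.inl h⟩
  | cons e t ih =>
    have h1 := bedge_negCnt d st e hd
    have h2 := ih (bedge d st e)
    simp only [List.foldl_cons]
    refine ⟨le_trans h2.1 h1.1, fun h => ?_⟩
    rcases h2.2 h with h3 | h3
    · rcases h1.2 h3 with h4 | h4
      · exact Or.inl h4
      · exact Or.inr (lt_of_le_of_lt h2.1 h4)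
    · exact Or.inr (lt_of_lt_of_le h3 h1.1)

-- B's `while changed:` loop; one pass over the edge list per distance level
def bwhile (roads : List (Int × Int)) (c : List Int) (d : Int) (hd : 0 ≤ d) : List Int :=
  if h : (bpass d roads c).2 = true then
    bwhile roads (bpass d roads c).1 (d + 1) (by omega)
  else (bpass d roads c).1
termination_by negCnt c
decreasing_by
  rcases (bpass_negCnt d roads (c, false) hd).2 h with h1 | h1
  · simp at h1
  · exact h1

def solution_alt (n : Int) (roads : List (Int × Int)) (sources : List Int) (destination : Int) : List Int :=
  let checked := List.replicate (n + 1).toNat (-1 : Int)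
  let checked := PySem.List.pySetD checked destination 0
  let checked := bwhile roads checked 0 (by omega)
  sources.map (fun i => PySem.List.pyGetD checked i 0)

-- ===== PRECONDITION & SPEC =====
-- Pre_: exactly the inputs where Python A returns: a non-negative n and every index used
-- (road endpoints, destination, sources) within Python's in-range band [-(n+1), n] for the
-- length-(n+1) arrays (negative indices wrap identically in both programs).
def Pre_solution (n : Int) (roads : List (Int × Int)) (sources : List Int) (destination : Int) : Prop :=
  0 ≤ n ∧ (-(n + 1) ≤ destination ∧ destination ≤ n) ∧
  (∀ p ∈ roads, (-(n + 1) ≤ p.1 ∧ p.1 ≤ n) ∧ (-(n + 1) ≤ p.2 ∧ p.2 ≤ n)) ∧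
  (∀ i ∈ sources, -(n + 1) ≤ i ∧ i ≤ n)
instance (n : Int) (roads : List (Int × Int)) (sources : List Int) (destination : Int) : Decidable (Pre_solution n roads sources destination) := by unfold Pre_solution; infer_instance

def pvWitness_solution : Int × (List (Int × Int)) × List Int × Int := (4, [(0, 1), (1, 2), (2, 3)], [0, 3, 4], 2)

def Spec_solution (n : Int) (roads : List (Int × Int)) (sources : List Int) (destination : Int) (out : List Int) : Prop := out = solution_alt n roads sources destination
instance (n : Int) (roads : List (Int × Int)) (sources : List Int) (destination : Int) (out : List Int) : Decidable (Spec_solution n roads sources destination out) := by unfold Spec_solution; infer_instance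

-- ===== CLAIM (what is proved, stated in full; the proofs are below) =====
def Claim_equal_solution : Prop := ∀ (n : Int) (roads : List (Int × Int)) (sources : List Int) (destination : Int), Dom_solution n roads sources destination → Pre_solution n roads sources destination → Spec_solution n roads sources destination (solution n roads sources destination)

-- ===== LEMMAS AND PROOFS =====

-- ---- intermediate program: A's BFS run level-synchronously (frontier list instead of the queue)

def bloopExpand (arr : List (List Int)) (st : List Int × List Int) (node : Int) : List Int × List Int :=
  (PySem.List.pyGetD arr node []).foldl (bfsVisit node) st

theorem foldExpand_inv (arr : List (List Int)) (f : List Int) (st : List Int × List Int) (h : AllGE st.1) :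
    AllGE (f.foldl (bloopExpand arr) st).1 ∧
    negCnt (f.foldl (bloopExpand arr) st).1 + (f.foldl (bloopExpand arr) st).2.length
      = negCnt st.1 + st.2.length ∧
    negCnt (f.foldl (bloopExpand arr) st).1 ≤ negCnt st.1 := by
  induction f generalizing st with
  | nil => exact ⟨h, rfl, le_refl _⟩
  | cons nb nbrs ih =>
    have h1 := foldVisit_inv nb (PySem.List.pyGetD arr nb []) st h
    have h2 := ih (bloopExpand arr st nb) h1.1
    simp only [List.foldl_cons]
    exact ⟨h2.1, by unfold bloopExpand at *; omega, le_trans h2.2.2 h1.2.2⟩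

def bloop (arr : List (List Int)) (c : List Int) (f : List Int) (h : AllGE c) : List Int :=
  match f with
  | [] => c
  | node :: rest =>
    let st := (node :: rest).foldl (bloopExpand arr) (c, ([] : List Int))
    bloop arr st.1 st.2 (foldExpand_inv arr (node :: rest) (c, []) h).1
termination_by (negCnt c, f.length)
decreasing_by
  have h2 := (foldExpand_inv arr (node :: rest) (c, []) h).2
  dsimp only at h2 ⊢
  simp only [List.length_nil, List.length_cons] at h2 ⊢
  rcases Nat.lt_or_ge (negCnt ((node :: rest).foldl (bloopExpand arr) (c, ([] : List Int))).1) (negCnt c) with hlt | hge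
  · exact Prod.Lex.left _ _ hlt
  · have heq : negCnt ((node :: rest).foldl (bloopExpand arr) (c, ([] : List Int))).1 = negCnt c := le_antisymm h2.2 hge
    have hlen : ((node :: rest).foldl (bloopExpand arr) (c, ([] : List Int))).2.length = 0 := by omega
    rw [heq, hlen]
    exact Prod.Lex.right _ (by omega)

-- proof-irrelevant congruence for the two loops
theorem aloop_congr (arr : List (List Int)) {c c' q q' : List Int} (hc : c = c') (hq : q = q')
    (h : AllGE c) (h' : AllGE c') : aloop arr c q h = aloop arr c' q' h' := by
  subst hc; subst hq; rfl

theorem aloop_cons (arr : List (List Int)) (c : List Int) (node : Int) (rest : List Int)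
    (h : AllGE c) :
    aloop arr c (node :: rest) h
      = aloop arr ((PySem.List.pyGetD arr node []).foldl (bfsVisit node) (c, rest)).1
          ((PySem.List.pyGetD arr node []).foldl (bfsVisit node) (c, rest)).2
          (foldVisit_inv node _ (c, rest) h).1 := by
  rw [aloop]

theorem bloop_cons (arr : List (List Int)) (c : List Int) (node : Int) (rest : List Int)
    (h : AllGE c) :
    bloop arr c (node :: rest) h
      = bloop arr ((node :: rest).foldl (bloopExpand arr) (c, [])).1
          ((node :: rest).foldl (bloopExpand arr) (c, [])).2
          (foldExpand_inv arr (node :: rest) (c, []) h).1 := by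
  rw [bloop]

-- a fold whose step only appends to the second component splits off that component
theorem foldl_split (g : (List Int × List Int) → Int → (List Int × List Int))
    (hg : ∀ c q x, g (c, q) x = ((g (c, []) x).1, q ++ (g (c, []) x).2)) :
    ∀ (l : List Int) (c q : List Int),
      l.foldl g (c, q) = ((l.foldl g (c, [])).1, q ++ (l.foldl g (c, [])).2) := by
  intro l
  induction l with
  | nil => intro c q; simp
  | cons x l ih =>
    intro c q
    simp only [List.foldl_cons]
    rw [hg c q x]
    rw [ih (g (c, []) x).1 (q ++ (g (c, []) x).2)]
    have h2 := ih (g (c, []) x).1 (g (c, []) x).2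
    rw [Prod.mk.eta] at h2
    rw [h2]
    simp [List.append_assoc]

theorem bfsVisit_split (node : Int) :
    ∀ (c q : List Int) (nb : Int),
      bfsVisit node (c, q) nb = ((bfsVisit node (c, []) nb).1, q ++ (bfsVisit node (c, []) nb).2) := by
  intro c q nb
  unfold bfsVisit
  by_cases h0 : PySem.List.pyGet? c nb = some (-1) <;> simp [h0]

theorem expand_split (arr : List (List Int)) :
    ∀ (c q : List Int) (node : Int),
      bloopExpand arr (c, q) node
        = ((bloopExpand arr (c, []) node).1, q ++ (bloopExpand arr (c, []) node).2) := by
  intro c q node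
  unfold bloopExpand
  exact foldl_split (bfsVisit node) (bfsVisit_split node) (PySem.List.pyGetD arr node []) c q

-- the queue BFS processed on `f ++ g` equals: expand all of `f` first, then continue on `g ++ discoveries`
theorem aloop_level (arr : List (List Int)) :
    ∀ (f c g : List Int) (h : AllGE c) (h' : AllGE (f.foldl (bloopExpand arr) (c, [])).1),
      aloop arr c (f ++ g) h
        = aloop arr (f.foldl (bloopExpand arr) (c, [])).1
            (g ++ (f.foldl (bloopExpand arr) (c, [])).2) h' := by
  intro f
  induction f with
  | nil =>
    intro c g h h'
    exact aloop_congr arr rfl (by simp) h h'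
  | cons x f ih =>
    intro c g h h'
    have hsp := foldl_split (bfsVisit x) (bfsVisit_split x) (PySem.List.pyGetD arr x []) c (f ++ g)
    have hE1 : ((PySem.List.pyGetD arr x []).foldl (bfsVisit x) (c, f ++ g)).1
        = ((PySem.List.pyGetD arr x []).foldl (bfsVisit x) (c, [])).1 := by rw [hsp]
    have hE2 : ((PySem.List.pyGetD arr x []).foldl (bfsVisit x) (c, f ++ g)).2
        = f ++ (g ++ ((PySem.List.pyGetD arr x []).foldl (bfsVisit x) (c, [])).2) := by
      rw [hsp]; simp [List.append_assoc]
    rw [show (x :: f) ++ g = x :: (f ++ g) from rfl, aloop_cons arr c x (f ++ g) h]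
    rw [aloop_congr arr hE1 hE2 _ ((foldVisit_inv x _ (c, []) h).1)]
    rw [ih _ _ ((foldVisit_inv x _ (c, []) h).1)
        ((foldExpand_inv arr f (((PySem.List.pyGetD arr x []).foldl (bfsVisit x) (c, [])).1, []) ((foldVisit_inv x _ (c, []) h).1)).1)]
    have hY := foldl_split (bloopExpand arr) (expand_split arr) f
        ((PySem.List.pyGetD arr x []).foldl (bfsVisit x) (c, [])).1
        ((PySem.List.pyGetD arr x []).foldl (bfsVisit x) (c, [])).2
    have hX : (x :: f).foldl (bloopExpand arr) (c, [])
        = ((f.foldl (bloopExpand arr) (((PySem.List.pyGetD arr x []).foldl (bfsVisit x) (c, [])).1, [])).1,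
           ((PySem.List.pyGetD arr x []).foldl (bfsVisit x) (c, [])).2
             ++ (f.foldl (bloopExpand arr) (((PySem.List.pyGetD arr x []).foldl (bfsVisit x) (c, [])).1, [])).2) := by
      simp only [List.foldl_cons]
      rw [show bloopExpand arr (c, []) x
            = (((PySem.List.pyGetD arr x []).foldl (bfsVisit x) (c, [])).1,
               ((PySem.List.pyGetD arr x []).foldl (bfsVisit x) (c, [])).2) from (Prod.mk.eta).symm]
      exact hY
    exact aloop_congr arr (by rw [hX]) (by rw [hX]; simp [List.append_assoc]) _ h'

theorem bloop_eq_aloop (arr : List (List Int)) (c : List Int) (f : List Int) (h : AllGE c) :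
    bloop arr c f h = aloop arr c f h := by
  induction c, f, h using bloop.induct arr with
  | case1 c h => rw [bloop, aloop]
  | case2 c h node rest st ih =>
    rw [bloop_cons, ih]
    have hlv := aloop_level arr (node :: rest) c [] h
        ((foldExpand_inv arr (node :: rest) (c, []) h).1)
    rw [List.append_nil] at hlv
    rw [hlv]
    exact aloop_congr arr rfl (by simp only [List.nil_append]; rfl) _ _

-- ---- index / cell toolbox

theorem pyIdx?_lt {m : Nat} {i : Int} {k : Nat} (h : PySem.List.pyIdx? m i = some k) : k < m := by
  unfold PySem.List.pyIdx? at h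
  split_ifs at h <;> simp at h <;> omega

theorem pyGet?_char {α : Type} {cs : List α} {i : Int} {v : α} :
    PySem.List.pyGet? cs i = some v ↔
    ∃ k, PySem.List.pyIdx? cs.length i = some k ∧ ∃ hk : k < cs.length, cs[k]'hk = v := by
  unfold PySem.List.pyGet?
  cases hidx : PySem.List.pyIdx? cs.length i with
  | none => simp
  | some k =>
    have hk := pyIdx?_lt hidx
    simp [hk]

theorem pySetD_idx {α : Type} {cs : List α} {i : Int} {k : Nat}
    (h : PySem.List.pyIdx? cs.length i = some k) (v : α) :
    PySem.List.pySetD cs i v = cs.set k v := by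
  unfold PySem.List.pySetD PySem.List.pySet?
  rw [h]; rfl

theorem pySetD_noidx {α : Type} {cs : List α} {i : Int}
    (h : PySem.List.pyIdx? cs.length i = none) (v : α) :
    PySem.List.pySetD cs i v = cs := by
  unfold PySem.List.pySetD PySem.List.pySet?
  rw [h]; rfl

theorem pyGetD_idx {α : Type} {cs : List α} {i : Int} {k : Nat} {d0 : α}
    (h : PySem.List.pyIdx? cs.length i = some k) :
    PySem.List.pyGetD cs i d0 = cs[k]'(pyIdx?_lt h) := by
  unfold PySem.List.pyGetD PySem.List.pyGet?
  rw [h]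
  simp [List.getElem?_eq_getElem (pyIdx?_lt h)]

theorem pyGetD_noidx {α : Type} {cs : List α} {i : Int} {d0 : α}
    (h : PySem.List.pyIdx? cs.length i = none) :
    PySem.List.pyGetD cs i d0 = d0 := by
  unfold PySem.List.pyGetD PySem.List.pyGet?
  rw [h]; rfl

-- ---- the per-level array update, as a pointwise function

def hitP (m : Nat) (y : Int) (k : Nat) : Bool := PySem.List.pyIdx? m y == some k

def levelStep (cs : List Int) (d : Int) (p : Nat → Bool) : List Int :=
  cs.mapIdx (fun k v => if v = -1 ∧ p k = true then d + 1 else v)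

theorem length_levelStep (cs : List Int) (d : Int) (p : Nat → Bool) :
    (levelStep cs d p).length = cs.length := by
  simp [levelStep]

theorem getElem_levelStep (cs : List Int) (d : Int) (p : Nat → Bool) {j : Nat} (hj : j < cs.length) :
    (levelStep cs d p)[j]'(by rw [length_levelStep]; exact hj)
      = if cs[j]'hj = -1 ∧ p j = true then d + 1 else cs[j]'hj := by
  simp [levelStep]

theorem levelStep_ext {cs : List Int} {d : Int} {p : Nat → Bool} {ys : List Int}
    (hl : ys.length = cs.length)
    (h : ∀ j (hj : j < cs.length), ys[j]'(by omega) = if cs[j]'hj = -1 ∧ p j = true then d + 1 else cs[j]'hj) :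
    levelStep cs d p = ys := by
  apply List.ext_getElem (by rw [length_levelStep, hl])
  intro j h1 h2
  have hj : j < cs.length := by rw [length_levelStep] at h1; exact h1
  rw [getElem_levelStep cs d p hj, h j hj]

theorem levelStep_eq_self {cs : List Int} {d : Int} {p : Nat → Bool}
    (h : ∀ j (hj : j < cs.length), cs[j]'hj = -1 → p j = false) : levelStep cs d p = cs := by
  apply levelStep_ext rfl
  intro j hj
  by_cases hneg : cs[j]'hj = -1
  · simp [hneg, h j hj hneg]
  · simp [hneg]

theorem levelStep_congr {cs : List Int} {d : Int} {p q : Nat → Bool}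
    (h : ∀ j (hj : j < cs.length), cs[j]'hj = -1 → p j = q j) :
    levelStep cs d p = levelStep cs d q := by
  apply levelStep_ext (by rw [length_levelStep])
  intro j hj
  rw [getElem_levelStep cs d q hj]
  by_cases hneg : cs[j]'hj = -1
  · rw [h j hj hneg]
  · simp [hneg]

theorem levelStep_funext {cs : List Int} {d : Int} {p q : Nat → Bool}
    (h : ∀ k, p k = q k) : levelStep cs d p = levelStep cs d q := by
  have : p = q := funext h
  rw [this]

theorem levelStep_comp {cs : List Int} {d : Int} {p q : Nat → Bool} (hd : 0 ≤ d) :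
    levelStep (levelStep cs d p) d q = levelStep cs d (fun k => p k || q k) := by
  apply List.ext_getElem (by simp [length_levelStep])
  intro j h1 h2
  have hj : j < cs.length := by simpa [length_levelStep] using h1
  have hj2 : j < (levelStep cs d p).length := by rwa [length_levelStep]
  rw [getElem_levelStep (levelStep cs d p) d q hj2, getElem_levelStep cs d p hj,
      getElem_levelStep cs d (fun k => p k || q k) hj]
  by_cases hneg : cs[j]'hj = -1
  · by_cases hp : p j = true
    · simp [hneg, hp]
    · simp at hp
      by_cases hq : q j = true <;> simp [hneg, hp, hq]
  · simp [hneg]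

-- ---- cell-level corollaries and stability of levelStep

theorem idx_levelStep (cs : List Int) (d : Int) (p : Nat → Bool) (i : Int) :
    PySem.List.pyIdx? (levelStep cs d p).length i = PySem.List.pyIdx? cs.length i := by
  rw [length_levelStep]

theorem getElem_levelStep_of_ne {cs : List Int} {d : Int} {p : Nat → Bool} {j : Nat}
    (hj : j < cs.length) (hneg : cs[j]'hj ≠ -1) :
    (levelStep cs d p)[j]'(by rw [length_levelStep]; exact hj) = cs[j]'hj := by
  rw [getElem_levelStep cs d p hj]
  simp [hneg]

theorem getElem_levelStep_neg_iff {cs : List Int} {d : Int} {p : Nat → Bool} {j : Nat}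
    (hd : 0 ≤ d) (hj : j < cs.length) :
    (levelStep cs d p)[j]'(by rw [length_levelStep]; exact hj) = -1 ↔ (cs[j]'hj = -1 ∧ p j = false) := by
  rw [getElem_levelStep cs d p hj]
  by_cases hneg : cs[j]'hj = -1
  · by_cases hp : p j = true
    · simp [hneg, hp]; omega
    · simp at hp; simp [hneg, hp]
  · simp [hneg]

theorem pyGet?_levelStep_d {cs : List Int} {d : Int} {p : Nat → Bool} {i : Int} (hd : 0 ≤ d) :
    PySem.List.pyGet? (levelStep cs d p) i = some d ↔ PySem.List.pyGet? cs i = some d := by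
  rw [pyGet?_char, pyGet?_char]
  constructor
  · rintro ⟨k, hidx, hk, hcell⟩
    rw [length_levelStep] at hidx hk
    refine ⟨k, hidx, hk, ?_⟩
    rw [getElem_levelStep cs d p hk] at hcell
    by_cases hneg : cs[k]'hk = -1
    · by_cases hp : p k = true
      · simp [hneg, hp] at hcell
      · simp at hp; simp [hneg, hp] at hcell; omega
    · simpa [hneg] using hcell
  · rintro ⟨k, hidx, hk, hcell⟩
    refine ⟨k, by rwa [length_levelStep], by rw [length_levelStep]; exact hk, ?_⟩
    have hneg : cs[k]'hk ≠ -1 := by omega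
    rw [getElem_levelStep_of_ne hk hneg]
    exact hcell

theorem getD_levelStep_d {cs : List Int} {d : Int} {p : Nat → Bool} {x : Int} (hd : 0 ≤ d)
    (h : PySem.List.pyGetD cs x 0 = d) :
    PySem.List.pyGetD (levelStep cs d p) x 0 = d := by
  cases hidx : PySem.List.pyIdx? cs.length x with
  | none =>
    rw [pyGetD_noidx ((idx_levelStep cs d p x).trans hidx)]
    rw [pyGetD_noidx hidx] at h
    exact h
  | some k =>
    have hk := pyIdx?_lt hidx
    rw [pyGetD_idx hidx] at h
    rw [pyGetD_idx ((idx_levelStep cs d p x).trans hidx)]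
    have hneg : cs[k]'hk ≠ -1 := by omega
    rw [getElem_levelStep_of_ne hk hneg]
    exact h

-- the "changed" flag of a pass, as a predicate on the pass's write set
def flagP (cs : List Int) (p : Nat → Bool) : Prop :=
  ∃ k, ∃ hk : k < cs.length, cs[k]'hk = -1 ∧ p k = true

theorem levelStep_eq_self_of_not_flag {cs : List Int} {d : Int} {p : Nat → Bool}
    (h : ¬ flagP cs p) : levelStep cs d p = cs := by
  apply levelStep_eq_self
  intro j hj hneg
  by_contra hp
  simp at hp
  exact h ⟨j, hj, hneg, hp⟩

-- counting -1 cells: pointwise comparison lemmas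
theorem negCnt_le_of (xs : List Int) :
    ∀ (ys : List Int) (hl : ys.length = xs.length),
    (∀ j (hj : j < xs.length), ys[j]'(by omega) = -1 → xs[j]'hj = -1) →
    negCnt ys ≤ negCnt xs := by
  induction xs with
  | nil =>
    intro ys hl _
    simp at hl
    simp [hl]
  | cons x xt ih =>
    intro ys hl h1
    cases ys with
    | nil => simp [negCnt]
    | cons y yt =>
      simp at hl
      have hhead : y = -1 → x = -1 := by
        have := h1 0 (by simp)
        simpa using this
      have htail := ih yt hl (fun j hj hy => by
        have := h1 (j + 1) (by simpa using Nat.succ_lt_succ hj)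
        simpa using this hy)
      simp only [negCnt, List.countP_cons] at *
      by_cases hy : y = -1
      · simp [hy, hhead hy]; omega
      · simp [hy]
        split <;> omega

theorem negCnt_lt_of (xs : List Int) :
    ∀ (ys : List Int) (hl : ys.length = xs.length),
    (∀ j (hj : j < xs.length), ys[j]'(by omega) = -1 → xs[j]'hj = -1) →
    (∃ j, ∃ hj : j < xs.length, xs[j]'hj = -1 ∧ ys[j]'(by omega) ≠ -1) →
    negCnt ys < negCnt xs := by
  induction xs with
  | nil =>
    rintro ys hl _ ⟨j, hj, _⟩
    simp at hj
  | cons x xt ih =>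
    rintro ys hl h1 ⟨j, hj, hx, hy⟩
    cases ys with
    | nil => simp at hl
    | cons y yt =>
      simp at hl
      have htail_le := negCnt_le_of xt yt hl (fun j hj hy => by
        have := h1 (j + 1) (by simpa using Nat.succ_lt_succ hj)
        simpa using this hy)
      simp only [negCnt, List.countP_cons] at *
      cases j with
      | zero =>
        simp at hx hy
        simp [hx, hy]
        omega
      | succ j =>
        simp at hx hy hj
        have htail_lt := ih yt hl (fun j hj hy => by
          have := h1 (j + 1) (by simpa using Nat.succ_lt_succ hj)
          simpa using this hy) ⟨j, hj, hx, hy⟩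
        have hhead := h1 0 (by simp)
        simp at hhead
        by_cases hy0 : y = -1
        · simp [hy0, hhead hy0]; omega
        · simp [hy0]; split <;> omega

theorem negCnt_levelStep_lt {cs : List Int} {d : Int} {p : Nat → Bool} (hd : 0 ≤ d)
    (h : flagP cs p) : negCnt (levelStep cs d p) < negCnt cs := by
  obtain ⟨k, hk, hneg, hp⟩ := h
  apply negCnt_lt_of cs (levelStep cs d p) (length_levelStep cs d p)
  · intro j hj hy
    exact ((getElem_levelStep_neg_iff hd hj).mp hy).1
  · refine ⟨k, hk, hneg, ?_⟩
    rw [getElem_levelStep cs d p hk]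
    simp [hneg, hp]
    omega

-- ---- A's inner neighbour loop, characterised pointwise

theorem visit_fst {cs : List Int} {node d : Int} (hr : PySem.List.pyGetD cs node 0 = d)
    (q : List Int) (nb : Int) :
    (bfsVisit node (cs, q) nb).1 = levelStep cs d (hitP cs.length nb) := by
  unfold bfsVisit
  by_cases h0 : PySem.List.pyGet? cs nb = some (-1)
  · obtain ⟨k, hidx, hk, hcell⟩ := pyGet?_char.mp h0
    simp only [h0, if_pos]
    rw [pySetD_idx hidx, hr]
    symm
    apply levelStep_ext (by simp)
    intro j hj
    by_cases hjk : j = k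
    · subst hjk
      simp [List.getElem_set_self, hcell, hitP, hidx]
    · rw [List.getElem_set_ne (by omega)]
      have : hitP cs.length nb j = false := by
        simp [hitP, hidx]
        omega
      simp [this]
  · simp only [h0, if_neg, not_false_iff]
    symm
    apply levelStep_eq_self
    intro j hj hneg
    by_contra hp
    simp only [hitP, Bool.not_eq_false, beq_iff_eq] at hp
    exact h0 (pyGet?_char.mpr ⟨j, hp, hj, hneg⟩)

theorem visit_snd {cs : List Int} (node : Int) (q : List Int) (nb : Int) :
    (bfsVisit node (cs, q) nb).2
      = q ++ (if PySem.List.pyGet? cs nb = some (-1) then [nb] else []) := by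
  unfold bfsVisit
  split <;> simp

theorem foldVisit_fst {node d : Int} (hd : 0 ≤ d) (ys : List Int) :
    ∀ (cs q : List Int), PySem.List.pyGetD cs node 0 = d →
    (ys.foldl (bfsVisit node) (cs, q)).1
      = levelStep cs d (fun k => ys.any (fun y => hitP cs.length y k)) := by
  induction ys with
  | nil =>
    intro cs q hr
    simp only [List.foldl_nil]
    symm
    apply levelStep_eq_self
    intro j hj _
    simp
  | cons y t ih =>
    intro cs q hr
    simp only [List.foldl_cons]
    have hpair : bfsVisit node (cs, q) y
        = (levelStep cs d (hitP cs.length y),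
           q ++ (if PySem.List.pyGet? cs y = some (-1) then [y] else [])) := by
      rw [← visit_fst hr q y, ← visit_snd node q y]
    rw [hpair]
    rw [ih _ _ (getD_levelStep_d hd hr)]
    rw [length_levelStep]
    rw [levelStep_comp hd]
    apply levelStep_funext
    intro k
    simp

theorem foldVisit_mem {node d : Int} (hd : 0 ≤ d) (ys : List Int) :
    ∀ (cs q : List Int), PySem.List.pyGetD cs node 0 = d →
    ∀ (k : Nat) (hk : k < cs.length),
    ((∃ x ∈ (ys.foldl (bfsVisit node) (cs, q)).2, PySem.List.pyIdx? cs.length x = some k) ↔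
      ((∃ x ∈ q, PySem.List.pyIdx? cs.length x = some k)
        ∨ (cs[k]'hk = -1 ∧ ys.any (fun y => hitP cs.length y k) = true))) := by
  induction ys with
  | nil =>
    intro cs q hr k hk
    simp
  | cons y t ih =>
    intro cs q hr k hk
    simp only [List.foldl_cons]
    have hpair : bfsVisit node (cs, q) y
        = (levelStep cs d (hitP cs.length y),
           q ++ (if PySem.List.pyGet? cs y = some (-1) then [y] else [])) := by
      rw [← visit_fst hr q y, ← visit_snd node q y]
    rw [hpair]
    have hih := ih (levelStep cs d (hitP cs.length y))
        (q ++ (if PySem.List.pyGet? cs y = some (-1) then [y] else []))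
        (getD_levelStep_d hd hr) k (by rw [length_levelStep]; exact hk)
    simp only [length_levelStep] at hih
    rw [hih]
    by_cases h0 : PySem.List.pyGet? cs y = some (-1)
    · obtain ⟨ky, hidxy, hky, hcelly⟩ := pyGet?_char.mp h0
      by_cases hkk : k = ky
      · subst hkk
        constructor
        · intro _
          right
          refine ⟨hcelly, ?_⟩
          simp [hitP, hidxy]
        · intro _
          left
          exact ⟨y, by simp [h0], hidxy⟩
      · have hhit : hitP cs.length y k = false := by
          simp [hitP, hidxy]; omega
        have hcell1 : (levelStep cs d (hitP cs.length y))[k]'(by rw [length_levelStep]; exact hk) = cs[k]'hk := by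
          rw [getElem_levelStep cs d _ hk]
          simp [hhit]
        rw [hcell1]
        simp only [h0, if_pos]
        constructor
        · rintro (⟨x, hx, hxk⟩ | ⟨hneg, hany⟩)
          · rcases List.mem_append.mp hx with hx | hx
            · exact Or.inl ⟨x, hx, hxk⟩
            · simp at hx
              subst hx
              rw [hxk] at hidxy
              simp at hidxy
              omega
          · exact Or.inr ⟨hneg, by simp [hany]⟩
        · rintro (⟨x, hx, hxk⟩ | ⟨hneg, hany⟩)
          · exact Or.inl ⟨x, List.mem_append.mpr (Or.inl hx), hxk⟩
          · simp only [List.any_cons, Bool.or_eq_true] at hany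
            rcases hany with hany | hany
            · rw [hhit] at hany; simp at hany
            · exact Or.inr ⟨hneg, hany⟩
    · have hself : levelStep cs d (hitP cs.length y) = cs := by
        apply levelStep_eq_self
        intro j hj hneg
        by_contra hp
        simp only [hitP, Bool.not_eq_false, beq_iff_eq] at hp
        exact h0 (pyGet?_char.mpr ⟨j, hp, hj, hneg⟩)
      have hcell1 : (levelStep cs d (hitP cs.length y))[k]'(by rw [length_levelStep]; exact hk) = cs[k]'hk := by
        simp only [hself]
      rw [hcell1]
      simp only [h0, if_neg, not_false_iff, List.append_nil]
      have hhit : cs[k]'hk = -1 → hitP cs.length y k = false := by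
        intro hneg
        by_contra hp
        simp only [hitP, Bool.not_eq_false, beq_iff_eq] at hp
        exact h0 (pyGet?_char.mpr ⟨k, hp, hk, hneg⟩)
      constructor
      · rintro (h | ⟨hneg, hany⟩)
        · exact Or.inl h
        · exact Or.inr ⟨hneg, by simp [hany]⟩
      · rintro (h | ⟨hneg, hany⟩)
        · exact Or.inl h
        · simp only [List.any_cons, Bool.or_eq_true] at hany
          rcases hany with hany | hany
          · rw [hhit hneg] at hany; simp at hany
          · exact Or.inr ⟨hneg, hany⟩

theorem foldVisit_sub {node d : Int} (hd : 0 ≤ d) (ys : List Int) :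
    ∀ (cs q : List Int), PySem.List.pyGetD cs node 0 = d →
    ∀ x ∈ (ys.foldl (bfsVisit node) (cs, q)).2,
      x ∈ q ∨ ∃ k, PySem.List.pyIdx? cs.length x = some k ∧ ∃ hk : k < cs.length, cs[k]'hk = -1 := by
  induction ys with
  | nil =>
    intro cs q hr x hx
    exact Or.inl hx
  | cons y t ih =>
    intro cs q hr x hx
    simp only [List.foldl_cons] at hx
    have hpair : bfsVisit node (cs, q) y
        = (levelStep cs d (hitP cs.length y),
           q ++ (if PySem.List.pyGet? cs y = some (-1) then [y] else [])) := by
      rw [← visit_fst hr q y, ← visit_snd node q y]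
    rw [hpair] at hx
    have := ih (levelStep cs d (hitP cs.length y))
        (q ++ (if PySem.List.pyGet? cs y = some (-1) then [y] else []))
        (getD_levelStep_d hd hr) x hx
    rcases this with hq | ⟨k, hidx, hk, hcell⟩
    · rcases List.mem_append.mp hq with hq | hq
      · exact Or.inl hq
      · split at hq
        · rename_i h0
          simp at hq
          subst hq
          obtain ⟨ky, hidxy, hky, hcelly⟩ := pyGet?_char.mp h0
          exact Or.inr ⟨ky, hidxy, hky, hcelly⟩
        · simp at hq
    · rw [length_levelStep] at hidx hk
      have := (getElem_levelStep_neg_iff hd hk).mp hcell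
      exact Or.inr ⟨k, hidx, hk, this.1⟩

-- ---- one whole level: A's frontier expansion and B's edge pass, as predicates

def pFront (arr : List (List Int)) (m : Nat) (F : List Int) (k : Nat) : Bool :=
  F.any (fun x => (PySem.List.pyGetD arr x []).any (fun y => hitP m y k))

def pEdge (cs : List Int) (d : Int) (roads : List (Int × Int)) (k : Nat) : Bool :=
  roads.any (fun e => (PySem.List.pyGet? cs e.1 == some d && hitP cs.length e.2 k)
                   || (PySem.List.pyGet? cs e.2 == some d && hitP cs.length e.1 k))

theorem foldExpand_fst {arr : List (List Int)} {d : Int} (hd : 0 ≤ d) (F : List Int) :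
    ∀ (cs q : List Int), (∀ x ∈ F, PySem.List.pyGetD cs x 0 = d) →
    (F.foldl (bloopExpand arr) (cs, q)).1 = levelStep cs d (pFront arr cs.length F) := by
  induction F with
  | nil =>
    intro cs q _
    simp only [List.foldl_nil]
    symm
    apply levelStep_eq_self
    intro j hj _
    simp [pFront]
  | cons x t ih =>
    intro cs q hm
    simp only [List.foldl_cons]
    have h1 : (bloopExpand arr (cs, q) x).1
        = levelStep cs d (fun k => (PySem.List.pyGetD arr x []).any (fun y => hitP cs.length y k)) :=
      foldVisit_fst hd _ cs q (hm x (by simp))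
    rw [show bloopExpand arr (cs, q) x
        = ((bloopExpand arr (cs, q) x).1, (bloopExpand arr (cs, q) x).2) from (Prod.mk.eta).symm, h1]
    have hm' : ∀ x' ∈ t, PySem.List.pyGetD
        (levelStep cs d (fun k => (PySem.List.pyGetD arr x []).any (fun y => hitP cs.length y k))) x' 0 = d :=
      fun x' hx' => getD_levelStep_d hd (hm x' (by simp [hx']))
    rw [ih _ _ hm']
    simp only [length_levelStep]
    rw [levelStep_comp hd]
    apply levelStep_funext
    intro k
    simp [pFront]

theorem foldExpand_mem {arr : List (List Int)} {d : Int} (hd : 0 ≤ d) (F : List Int) :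
    ∀ (cs q : List Int), (∀ x ∈ F, PySem.List.pyGetD cs x 0 = d) →
    ∀ (k : Nat) (hk : k < cs.length),
    ((∃ x ∈ (F.foldl (bloopExpand arr) (cs, q)).2, PySem.List.pyIdx? cs.length x = some k) ↔
      ((∃ x ∈ q, PySem.List.pyIdx? cs.length x = some k)
        ∨ (cs[k]'hk = -1 ∧ pFront arr cs.length F k = true))) := by
  induction F with
  | nil =>
    intro cs q _ k hk
    simp [pFront]
  | cons x t ih =>
    intro cs q hm k hk
    simp only [List.foldl_cons]
    have h1 : (bloopExpand arr (cs, q) x).1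
        = levelStep cs d (fun k => (PySem.List.pyGetD arr x []).any (fun y => hitP cs.length y k)) :=
      foldVisit_fst hd _ cs q (hm x (by simp))
    rw [show bloopExpand arr (cs, q) x
        = ((bloopExpand arr (cs, q) x).1, (bloopExpand arr (cs, q) x).2) from (Prod.mk.eta).symm, h1]
    have hm' : ∀ x' ∈ t, PySem.List.pyGetD
        (levelStep cs d (fun k => (PySem.List.pyGetD arr x []).any (fun y => hitP cs.length y k))) x' 0 = d :=
      fun x' hx' => getD_levelStep_d hd (hm x' (by simp [hx']))
    have hih := ih _ (bloopExpand arr (cs, q) x).2 hm' k (by rw [length_levelStep]; exact hk)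
    simp only [length_levelStep] at hih
    rw [hih]
    have hq1 := foldVisit_mem hd (PySem.List.pyGetD arr x []) cs q (hm x (by simp)) k hk
    have hcell := getElem_levelStep_neg_iff (p := fun k => (PySem.List.pyGetD arr x []).any (fun y => hitP cs.length y k)) hd hk
    unfold bloopExpand
    rw [hq1, hcell]
    simp only [pFront, List.any_cons, Bool.or_eq_true]
    constructor
    · rintro ((h | ⟨hneg, hany⟩) | ⟨⟨hneg, hany0⟩, hany⟩)
      · exact Or.inl h
      · exact Or.inr ⟨hneg, Or.inl hany⟩
      · exact Or.inr ⟨hneg, Or.inr hany⟩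
    · rintro (h | ⟨hneg, hany | hany⟩)
      · exact Or.inl (Or.inl h)
      · exact Or.inl (Or.inr ⟨hneg, hany⟩)
      · by_cases h0 : (PySem.List.pyGetD arr x []).any (fun y => hitP cs.length y k) = true
        · exact Or.inl (Or.inr ⟨hneg, h0⟩)
        · simp only [Bool.not_eq_true] at h0
          exact Or.inr ⟨⟨hneg, h0⟩, hany⟩

theorem foldExpand_sub {arr : List (List Int)} {d : Int} (hd : 0 ≤ d) (F : List Int) :
    ∀ (cs q : List Int), (∀ x ∈ F, PySem.List.pyGetD cs x 0 = d) →
    ∀ x ∈ (F.foldl (bloopExpand arr) (cs, q)).2,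
      x ∈ q ∨ ∃ k, PySem.List.pyIdx? cs.length x = some k ∧ ∃ hk : k < cs.length, cs[k]'hk = -1 := by
  induction F with
  | nil =>
    intro cs q _ x hx
    exact Or.inl hx
  | cons x0 t ih =>
    intro cs q hm x hx
    simp only [List.foldl_cons] at hx
    have h1 : (bloopExpand arr (cs, q) x0).1
        = levelStep cs d (fun k => (PySem.List.pyGetD arr x0 []).any (fun y => hitP cs.length y k)) :=
      foldVisit_fst hd _ cs q (hm x0 (by simp))
    rw [show bloopExpand arr (cs, q) x0
        = ((bloopExpand arr (cs, q) x0).1, (bloopExpand arr (cs, q) x0).2) from (Prod.mk.eta).symm, h1] at hx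
    have hm' : ∀ x' ∈ t, PySem.List.pyGetD
        (levelStep cs d (fun k => (PySem.List.pyGetD arr x0 []).any (fun y => hitP cs.length y k))) x' 0 = d :=
      fun x' hx' => getD_levelStep_d hd (hm x' (by simp [hx']))
    have := ih _ (bloopExpand arr (cs, q) x0).2 hm' x hx
    rcases this with hq | ⟨k, hidx, hk, hcell⟩
    · exact foldVisit_sub hd (PySem.List.pyGetD arr x0 []) cs q (hm x0 (by simp)) x hq
    · rw [length_levelStep] at hidx hk
      have := (getElem_levelStep_neg_iff hd hk).mp hcell
      exact Or.inr ⟨k, hidx, hk, this.1⟩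

-- ---- the adjacency list A builds, characterised by membership

theorem length_setAppend (ar : List (List Int)) (i z : Int) :
    (PySem.List.pySetD ar i (PySem.List.pyGetD ar i [] ++ [z])).length = ar.length := by
  unfold PySem.List.pySetD PySem.List.pySet?
  cases h : PySem.List.pyIdx? ar.length i <;> simp [h]

theorem mem_setAppend (ar : List (List Int)) (i z : Int) (j : Nat) (hj : j < ar.length) (y : Int) :
    y ∈ (PySem.List.pySetD ar i (PySem.List.pyGetD ar i [] ++ [z]))[j]'(by
        rw [length_setAppend]; exact hj) ↔
      (y ∈ ar[j]'hj ∨ (PySem.List.pyIdx? ar.length i = some j ∧ y = z)) := by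
  cases h1 : PySem.List.pyIdx? ar.length i with
  | none =>
    simp only [pySetD_noidx h1]
    simp [h1]
  | some j1 =>
    have hj1 := pyIdx?_lt h1
    simp only [pySetD_idx h1, pyGetD_idx h1]
    by_cases hjj : j = j1
    · subst hjj
      simp [List.getElem_set_self, h1]
    · rw [List.getElem_set_ne (by omega)]
      simp only [h1, Option.some.injEq]
      constructor
      · exact fun h => Or.inl h
      · rintro (h | ⟨h, _⟩)
        · exact h
        · exact absurd h.symm hjj

theorem length_buildStep (ar : List (List Int)) (e : Int × Int) :
    (buildStep ar e).length = ar.length := by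
  unfold buildStep
  rw [length_setAppend, length_setAppend]

theorem mem_buildStep (ar : List (List Int)) (e : Int × Int) (j : Nat) (hj : j < ar.length) (y : Int) :
    y ∈ (buildStep ar e)[j]'(by rw [length_buildStep]; exact hj) ↔
      (y ∈ ar[j]'hj ∨ ((PySem.List.pyIdx? ar.length e.1 = some j ∧ y = e.2)
        ∨ (PySem.List.pyIdx? ar.length e.2 = some j ∧ y = e.1))) := by
  unfold buildStep
  have hL := length_setAppend ar e.1 e.2
  have h2 := mem_setAppend (PySem.List.pySetD ar e.1 (PySem.List.pyGetD ar e.1 [] ++ [e.2]))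
      e.2 e.1 j (by rw [hL]; exact hj) y
  simp only [hL] at h2
  rw [h2]
  rw [mem_setAppend ar e.1 e.2 j hj y]
  tauto

theorem arrFold_length (roads : List (Int × Int)) :
    ∀ (ar : List (List Int)), (roads.foldl buildStep ar).length = ar.length := by
  induction roads with
  | nil => intro ar; rfl
  | cons e t ih =>
    intro ar
    simp only [List.foldl_cons]
    rw [ih, length_buildStep]

theorem arrFold_mem (roads : List (Int × Int)) :
    ∀ (ar : List (List Int)) (j : Nat) (hj : j < ar.length) (y : Int),
    (y ∈ (roads.foldl buildStep ar)[j]'(by rw [arrFold_length]; exact hj) ↔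
      (y ∈ ar[j]'hj ∨ ∃ e ∈ roads, (PySem.List.pyIdx? ar.length e.1 = some j ∧ y = e.2)
        ∨ (PySem.List.pyIdx? ar.length e.2 = some j ∧ y = e.1))) := by
  induction roads with
  | nil =>
    intro ar j hj y
    simp
  | cons e t ih =>
    intro ar j hj y
    simp only [List.foldl_cons]
    have hL := length_buildStep ar e
    have hih := ih (buildStep ar e) j (by rw [hL]; exact hj) y
    simp only [hL] at hih
    rw [hih, mem_buildStep ar e j hj y]
    constructor
    · rintro ((h | h) | ⟨e', he', h⟩)
      · exact Or.inl h
      · exact Or.inr ⟨e, by simp, h⟩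
      · exact Or.inr ⟨e', by simp [he'], h⟩
    · rintro (h | ⟨e', he', h⟩)
      · exact Or.inl (Or.inl h)
      · rcases List.mem_cons.mp he' with he' | he'
        · subst he'
          exact Or.inl (Or.inr h)
        · exact Or.inr ⟨e', he', h⟩

-- ---- the two level predicates agree on a consistent state

theorem pEdge_false {cs : List Int} {d : Int} {roads : List (Int × Int)}
    (h : ∀ (j : Nat) (hj : j < cs.length), cs[j]'hj ≠ d) :
    ∀ k, pEdge cs d roads k = false := by
  intro k
  simp only [pEdge, List.any_eq_false]
  intro e _
  have hno : ∀ i : Int, (PySem.List.pyGet? cs i == some d) = false := by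
    intro i
    simp only [beq_eq_false_iff_ne, ne_eq]
    intro hc
    obtain ⟨kk, _, hkk, hcell⟩ := pyGet?_char.mp hc
    exact h kk hkk hcell
  simp [hno]

theorem pFront_eq_pEdge {arr : List (List Int)} {cs : List Int} {d : Int}
    {roads : List (Int × Int)} {F : List Int}
    (hlen : arr.length = cs.length)
    (HARR : ∀ (j : Nat) (hj : j < arr.length) (y : Int),
      y ∈ arr[j]'hj ↔ ∃ e ∈ roads, (PySem.List.pyIdx? cs.length e.1 = some j ∧ y = e.2)
        ∨ (PySem.List.pyIdx? cs.length e.2 = some j ∧ y = e.1))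
    (HF : ∀ (j : Nat) (hj : j < cs.length), (cs[j]'hj = d ↔ ∃ x ∈ F, PySem.List.pyIdx? cs.length x = some j))
    (HM : ∀ x ∈ F, ∃ j, PySem.List.pyIdx? cs.length x = some j) :
    ∀ k, pFront arr cs.length F k = pEdge cs d roads k := by
  intro k
  have hget : ∀ (i : Int), PySem.List.pyGet? cs i = some d ↔
      ∃ j, PySem.List.pyIdx? cs.length i = some j ∧ ∃ x ∈ F, PySem.List.pyIdx? cs.length x = some j := by
    intro i
    rw [pyGet?_char]
    constructor
    · rintro ⟨j, hidx, hj, hcell⟩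
      exact ⟨j, hidx, (HF j hj).mp hcell⟩
    · rintro ⟨j, hidx, hx⟩
      exact ⟨j, hidx, pyIdx?_lt hidx, (HF j (pyIdx?_lt hidx)).mpr hx⟩
  rw [Bool.eq_iff_iff]
  simp only [pFront, pEdge, List.any_eq_true, Bool.or_eq_true, Bool.and_eq_true, beq_iff_eq, hitP]
  constructor
  · rintro ⟨x, hxF, y, hy, hyk⟩
    obtain ⟨j, hjx⟩ := HM x hxF
    rw [pyGetD_idx (by rw [hlen]; exact hjx)] at hy
    have := (HARR j (by rw [hlen]; exact pyIdx?_lt hjx) y).mp hy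
    obtain ⟨e, heR, he⟩ := this
    refine ⟨e, heR, ?_⟩
    rcases he with ⟨hidx1, hy2⟩ | ⟨hidx2, hy1⟩
    · subst hy2
      exact Or.inl ⟨(hget e.1).mpr ⟨j, hidx1, x, hxF, hjx⟩, hyk⟩
    · subst hy1
      exact Or.inr ⟨(hget e.2).mpr ⟨j, hidx2, x, hxF, hjx⟩, hyk⟩
  · rintro ⟨e, heR, ⟨h1, h2⟩ | ⟨h1, h2⟩⟩
    · obtain ⟨j, hidx, x, hxF, hjx⟩ := (hget e.1).mp h1
      refine ⟨x, hxF, e.2, ?_, h2⟩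
      rw [pyGetD_idx (by rw [hlen]; exact hjx)]
      exact (HARR j (by rw [hlen]; exact pyIdx?_lt hjx) e.2).mpr ⟨e, heR, Or.inl ⟨hidx, rfl⟩⟩
    · obtain ⟨j, hidx, x, hxF, hjx⟩ := (hget e.2).mp h1
      refine ⟨x, hxF, e.1, ?_, h2⟩
      rw [pyGetD_idx (by rw [hlen]; exact hjx)]
      exact (HARR j (by rw [hlen]; exact pyIdx?_lt hjx) e.1).mpr ⟨e, heR, Or.inr ⟨hidx, rfl⟩⟩

-- ---- B's edge pass, characterised by the same predicate machinery

theorem flagP_congr {cs : List Int} {p q : Nat → Bool}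
    (h : ∀ j (hj : j < cs.length), cs[j]'hj = -1 → p j = q j) :
    flagP cs p ↔ flagP cs q := by
  unfold flagP
  constructor
  · rintro ⟨k, hk, hneg, hp⟩
    exact ⟨k, hk, hneg, by rw [← h k hk hneg]; exact hp⟩
  · rintro ⟨k, hk, hneg, hq⟩
    exact ⟨k, hk, hneg, by rw [h k hk hneg]; exact hq⟩

theorem relax_char {cs : List Int} {d : Int} (hd : 0 ≤ d) (p : Nat → Bool) (w : Bool) (a b : Int)
    (hw : w = true ↔ flagP cs p) :
    (relax d (levelStep cs d p, w) a b).1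
      = levelStep cs d (fun k => p k || (PySem.List.pyGet? cs a == some d && hitP cs.length b k))
    ∧ ((relax d (levelStep cs d p, w) a b).2 = true
      ↔ flagP cs (fun k => p k || (PySem.List.pyGet? cs a == some d && hitP cs.length b k))) := by
  unfold relax
  by_cases hcond : PySem.List.pyGet? (levelStep cs d p) a = some d
      ∧ PySem.List.pyGet? (levelStep cs d p) b = some (-1)
  · rw [if_pos hcond]
    have hga : PySem.List.pyGet? cs a = some d := (pyGet?_levelStep_d hd).mp hcond.1
    obtain ⟨kb, hidxb, hkb, hcellb⟩ := pyGet?_char.mp hcond.2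
    rw [length_levelStep] at hidxb
    have hkb' : kb < cs.length := by rw [length_levelStep] at hkb; exact hkb
    have hcellb' : cs[kb]'hkb' = -1 ∧ p kb = false := by
      rw [← getElem_levelStep_neg_iff (p := p) (d := d) hd hkb']
      exact hcellb
    have hhitb : hitP cs.length b kb = true := by simp [hitP, hidxb]
    constructor
    · rw [pySetD_idx (by rw [length_levelStep]; exact hidxb)]
      dsimp only
      apply List.ext_getElem (by simp [length_levelStep])
      intro j h1 h2
      have hj : j < cs.length := by simpa [length_levelStep] using h2
      rw [getElem_levelStep cs d _ hj]
      by_cases hjk : j = kb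
      · subst hjk
        rw [List.getElem_set_self (by rw [List.length_set, length_levelStep]; exact hkb')]
        simp [hcellb'.1, hga, hhitb]
      · rw [List.getElem_set_ne (by omega)]
        rw [getElem_levelStep cs d p hj]
        have hhit : hitP cs.length b j = false := by
          simp [hitP, hidxb]; omega
        simp [hhit]
    · simp only [true_iff]
      exact ⟨kb, hkb', hcellb'.1, by simp [hcellb'.2, hga, hhitb]⟩
  · rw [if_neg hcond]
    have hsame : ∀ j (hj : j < cs.length), cs[j]'hj = -1 →
        p j = (p j || (PySem.List.pyGet? cs a == some d && hitP cs.length b j)) := by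
      intro j hj hneg
      by_cases hga : PySem.List.pyGet? cs a = some d
      · by_cases hhit : hitP cs.length b j = true
        · have hidxb : PySem.List.pyIdx? cs.length b = some j := by
            simpa [hitP] using hhit
          by_cases hpj : p j = true
          · simp [hpj]
          · exfalso
            apply hcond
            refine ⟨(pyGet?_levelStep_d hd).mpr hga, ?_⟩
            apply pyGet?_char.mpr
            refine ⟨j, by rw [length_levelStep]; exact hidxb, by rw [length_levelStep]; exact hj, ?_⟩
            rw [getElem_levelStep_neg_iff hd hj]
            simp at hpj
            exact ⟨hneg, hpj⟩
        · simp at hhit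
          simp [hhit]
      · have : (PySem.List.pyGet? cs a == some d) = false := by simp [hga]
        simp [this]
    exact ⟨levelStep_congr hsame, by rw [hw]; exact flagP_congr hsame⟩

theorem bedge_char {cs : List Int} {d : Int} (hd : 0 ≤ d) (p : Nat → Bool) (w : Bool) (e : Int × Int)
    (hw : w = true ↔ flagP cs p) :
    (bedge d (levelStep cs d p, w) e).1
      = levelStep cs d (fun k => p k ||
          ((PySem.List.pyGet? cs e.1 == some d && hitP cs.length e.2 k)
            || (PySem.List.pyGet? cs e.2 == some d && hitP cs.length e.1 k)))
    ∧ ((bedge d (levelStep cs d p, w) e).2 = true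
      ↔ flagP cs (fun k => p k ||
          ((PySem.List.pyGet? cs e.1 == some d && hitP cs.length e.2 k)
            || (PySem.List.pyGet? cs e.2 == some d && hitP cs.length e.1 k)))) := by
  unfold bedge
  have h1 := relax_char hd p w e.1 e.2 hw
  rw [show relax d (levelStep cs d p, w) e.1 e.2
      = ((relax d (levelStep cs d p, w) e.1 e.2).1, (relax d (levelStep cs d p, w) e.1 e.2).2)
      from (Prod.mk.eta).symm, h1.1]
  have h2 := relax_char hd _ _ e.2 e.1 h1.2
  rw [h2.1]
  have hfe : (fun k => (p k || (PySem.List.pyGet? cs e.1 == some d && hitP cs.length e.2 k))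
        || (PySem.List.pyGet? cs e.2 == some d && hitP cs.length e.1 k))
      = (fun k => p k ||
          ((PySem.List.pyGet? cs e.1 == some d && hitP cs.length e.2 k)
            || (PySem.List.pyGet? cs e.2 == some d && hitP cs.length e.1 k))) := by
    funext k
    rw [Bool.or_assoc]
  rw [← hfe]
  exact ⟨rfl, h2.2⟩

theorem bpass_char {cs : List Int} {d : Int} (hd : 0 ≤ d) (roads : List (Int × Int)) :
    ∀ (p : Nat → Bool) (w : Bool), (w = true ↔ flagP cs p) →
    (roads.foldl (bedge d) (levelStep cs d p, w)).1
      = levelStep cs d (fun k => p k || pEdge cs d roads k)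
    ∧ ((roads.foldl (bedge d) (levelStep cs d p, w)).2 = true
      ↔ flagP cs (fun k => p k || pEdge cs d roads k)) := by
  induction roads with
  | nil =>
    intro p w hw
    have hfe : (fun k => p k || pEdge cs d [] k) = p := by
      funext k
      simp [pEdge]
    rw [hfe]
    exact ⟨rfl, hw⟩
  | cons e t ih =>
    intro p w hw
    simp only [List.foldl_cons]
    have h1 := bedge_char hd p w e hw
    rw [show bedge d (levelStep cs d p, w) e
        = ((bedge d (levelStep cs d p, w) e).1, (bedge d (levelStep cs d p, w) e).2)
        from (Prod.mk.eta).symm, h1.1]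
    have h2 := ih _ _ h1.2
    have hfe : (fun k => (p k ||
          ((PySem.List.pyGet? cs e.1 == some d && hitP cs.length e.2 k)
            || (PySem.List.pyGet? cs e.2 == some d && hitP cs.length e.1 k))) || pEdge cs d t k)
        = (fun k => p k || pEdge cs d (e :: t) k) := by
      funext k
      simp [pEdge, Bool.or_assoc]
    rw [hfe] at h2
    exact h2

theorem bpass_full {cs : List Int} {d : Int} (hd : 0 ≤ d) (roads : List (Int × Int)) :
    (bpass d roads cs).1 = levelStep cs d (pEdge cs d roads)
    ∧ ((bpass d roads cs).2 = true ↔ flagP cs (pEdge cs d roads)) := by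
  unfold bpass
  have h0 : cs = levelStep cs d (fun _ => false) :=
    (levelStep_eq_self (by intro j hj _; rfl)).symm
  rw [show ((cs, false) : List Int × Bool) = (levelStep cs d (fun _ => false), false) from by rw [← h0]]
  have h1 := bpass_char (cs := cs) hd roads (fun _ => false) false (by simp [flagP])
  have hfe : (fun k => false || pEdge cs d roads k) = pEdge cs d roads := by
    funext k
    simp
  rw [hfe] at h1
  exact h1

-- ---- the main alignment: level-synchronous BFS = edge-relaxation fixpoint

theorem bloop_congr (arr : List (List Int)) {c c' f f' : List Int} (hc : c = c') (hf : f = f')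
    (h : AllGE c) (h' : AllGE c') : bloop arr c f h = bloop arr c' f' h' := by
  subst hc; subst hf; rfl

theorem align : ∀ (N : Nat) (cs F : List Int) (d : Int) (arr : List (List Int))
    (roads : List (Int × Int)) (hA : AllGE cs) (hd : 0 ≤ d),
    arr.length = cs.length →
    (∀ (j : Nat) (hj : j < arr.length) (y : Int),
      y ∈ arr[j]'hj ↔ ∃ e ∈ roads, (PySem.List.pyIdx? cs.length e.1 = some j ∧ y = e.2)
        ∨ (PySem.List.pyIdx? cs.length e.2 = some j ∧ y = e.1)) →
    (∀ j (hj : j < cs.length), cs[j]'hj ≤ d) →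
    (∀ j (hj : j < cs.length), (cs[j]'hj = d ↔ ∃ x ∈ F, PySem.List.pyIdx? cs.length x = some j)) →
    (∀ x ∈ F, ∃ j, PySem.List.pyIdx? cs.length x = some j) →
    negCnt cs < N →
    bloop arr cs F hA = bwhile roads cs d hd := by
  intro N
  induction N with
  | zero =>
    intro cs F d arr roads hA hd _ _ _ _ _ hcnt
    omega
  | succ N ih =>
    intro cs F d arr roads hA hd hlen HARR HB HF HM hcnt
    have hbp := bpass_full (cs := cs) hd roads
    cases F with
    | nil =>
      rw [bloop, bwhile]
      have hnod : ∀ j (hj : j < cs.length), cs[j]'hj ≠ d := by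
        intro j hj hc
        have := (HF j hj).mp hc
        simp at this
      have hnf : ¬ flagP cs (pEdge cs d roads) := by
        rintro ⟨k, hk, hneg, hp⟩
        rw [pEdge_false hnod k] at hp
        simp at hp
      rw [dif_neg (fun hx => hnf (hbp.2.mp hx))]
      rw [hbp.1]
      exact (levelStep_eq_self_of_not_flag hnf).symm
    | cons x F' =>
      rw [bloop_cons]
      have HMd : ∀ x' ∈ x :: F', PySem.List.pyGetD cs x' 0 = d := by
        intro x' hx'
        obtain ⟨j, hj⟩ := HM x' hx'
        rw [pyGetD_idx hj]
        exact (HF j (pyIdx?_lt hj)).mpr ⟨x', hx', hj⟩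
      have hpe := pFront_eq_pEdge hlen HARR HF (fun x' hx' => HM x' hx')
      have hst1 : ((x :: F').foldl (bloopExpand arr) (cs, ([] : List Int))).1
          = levelStep cs d (pEdge cs d roads) := by
        rw [foldExpand_fst hd _ cs [] HMd]
        exact levelStep_funext hpe
      have hmem := foldExpand_mem (arr := arr) hd (x :: F') cs [] HMd
      have hsub := foldExpand_sub (arr := arr) hd (x :: F') cs [] HMd
      by_cases hch : flagP cs (pEdge cs d roads)
      · rw [bwhile, dif_pos (hbp.2.mpr hch)]
        have hlt : negCnt (levelStep cs d (pEdge cs d roads)) < negCnt cs :=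
          negCnt_levelStep_lt hd hch
        have hA' : AllGE (levelStep cs d (pEdge cs d roads)) := by
          intro v hv
          obtain ⟨j, hj, hvj⟩ := List.mem_iff_getElem.mp hv
          have hj' : j < cs.length := by rwa [length_levelStep] at hj
          rw [getElem_levelStep cs d _ hj'] at hvj
          subst hvj
          split
          · omega
          · exact hA _ (List.getElem_mem hj')
        refine (bloop_congr arr hst1 rfl _ hA').trans ?_
        rw [hbp.1]
        apply ih (levelStep cs d (pEdge cs d roads))
            ((x :: F').foldl (bloopExpand arr) (cs, ([] : List Int))).2 (d + 1) arr roads hA'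
            (by omega)
        · rw [length_levelStep]; exact hlen
        · intro j hj y
          simpa only [length_levelStep] using HARR j hj y
        · intro j hj
          have hj' : j < cs.length := by rwa [length_levelStep] at hj
          rw [getElem_levelStep cs d _ hj']
          split
          · omega
          · have := HB j hj'
            omega
        · intro j hj
          have hj' : j < cs.length := by rwa [length_levelStep] at hj
          rw [getElem_levelStep cs d _ hj']
          have hm := hmem j hj'
          simp only [List.mem_nil_iff, false_and, exists_false, false_or] at hm
          rw [hpe j] at hm
          simp only [length_levelStep]
          rw [hm]
          constructor
          · intro hc
            split at hc
            · rename_i hcc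
              exact hcc
            · exfalso
              have := HB j hj'
              omega
          · intro hc
            simp [hc.1, hc.2]
        · intro x' hx'
          rcases hsub x' hx' with hq | ⟨k, hidx, hk, _⟩
          · simp at hq
          · rw [length_levelStep]
            exact ⟨k, hidx⟩
        · omega
      · have hst2 : ((x :: F').foldl (bloopExpand arr) (cs, ([] : List Int))).2 = [] := by
          cases hF2 : ((x :: F').foldl (bloopExpand arr) (cs, ([] : List Int))).2 with
          | nil => rfl
          | cons z zs =>
            exfalso
            have hz : z ∈ ((x :: F').foldl (bloopExpand arr) (cs, ([] : List Int))).2 := by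
              rw [hF2]; simp
            rcases hsub z hz with hq | ⟨k, hidx, hk, hcell⟩
            · simp at hq
            · have := (hmem k hk).mp ⟨z, hz, hidx⟩
              rcases this with ⟨w, hw, _⟩ | ⟨hneg, hpf⟩
              · simp at hw
              · exact hch ⟨k, hk, hneg, by rw [← hpe k]; exact hpf⟩
        have hst1' : ((x :: F').foldl (bloopExpand arr) (cs, ([] : List Int))).1 = cs := by
          rw [hst1]
          exact levelStep_eq_self_of_not_flag hch
        rw [bwhile, dif_neg (fun hx => hch (hbp.2.mp hx))]
        rw [hbp.1]
        rw [bloop_congr arr hst1' hst2 _ hA, bloop]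
        exact (levelStep_eq_self_of_not_flag hch).symm

-- indices admitted by Pre_ are exactly Python's in-range band
theorem band_idx {n i : Int} (hn : 0 ≤ n) (h1 : -(n + 1) ≤ i) (h2 : i ≤ n) :
    ∃ k, PySem.List.pyIdx? (n + 1).toNat i = some k ∧ k < (n + 1).toNat := by
  unfold PySem.List.pyIdx?
  split_ifs with ha hb hc
  · exact ⟨i.toNat, rfl, by omega⟩
  · exfalso; omega
  · exact ⟨(n + 1).toNat - (-i).toNat, rfl, by omega⟩
  · exfalso; omega

-- ===== VERDICT (by name: the statement is the Claim_ definition above) =====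
theorem solution_spec : Claim_equal_solution := by
  intro n roads sources destination _ hpre
  obtain ⟨hn, hdest, hroads, hsrc⟩ := hpre
  unfold Spec_solution solution solution_alt
  dsimp only
  have hbase : (List.replicate (n + 1).toNat (-1 : Int)).length = (n + 1).toNat := by simp
  obtain ⟨kd, hkd, hkdlt⟩ := band_idx hn hdest.1 hdest.2
  have hkd' : PySem.List.pyIdx? (List.replicate (n + 1).toNat (-1 : Int)).length destination = some kd := by
    rw [hbase]; exact hkd
  have hc0 : PySem.List.pySetD (List.replicate (n + 1).toNat (-1 : Int)) destination 0
      = (List.replicate (n + 1).toNat (-1 : Int)).set kd 0 := pySetD_idx hkd' 0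
  have hc0len : (PySem.List.pySetD (List.replicate (n + 1).toNat (-1 : Int)) destination 0).length
      = (n + 1).toNat := by rw [hc0]; simp
  have harr : aloop (roads.foldl buildStep (List.replicate (n + 1).toNat ([] : List Int)))
        (PySem.List.pySetD (List.replicate (n + 1).toNat (-1 : Int)) destination 0) [destination]
        (allGE_pySetD _ _ _ (allGE_replicate _) (by norm_num))
      = bwhile roads (PySem.List.pySetD (List.replicate (n + 1).toNat (-1 : Int)) destination 0) 0
        (by omega) := by
    rw [← bloop_eq_aloop]
    apply align (negCnt (PySem.List.pySetD (List.replicate (n + 1).toNat (-1 : Int)) destination 0) + 1)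
    · rw [arrFold_length]
      rw [hc0len]
      simp
    · intro j hj y
      have hjm : j < (List.replicate (n + 1).toNat ([] : List Int)).length := by
        rwa [arrFold_length] at hj
      have := arrFold_mem roads (List.replicate (n + 1).toNat ([] : List Int)) j hjm y
      rw [this]
      simp only [List.getElem_replicate, List.mem_nil_iff, false_or]
      simp only [List.length_replicate, hc0len]
    · intro j hj
      simp only [hc0] at hj ⊢
      simp only [List.length_set, List.length_replicate] at hj
      by_cases hjk : j = kd
      · subst hjk
        rw [List.getElem_set_self (by simpa using hkdlt)]
      · rw [List.getElem_set_ne (by omega), List.getElem_replicate]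
        omega
    · intro j hj
      simp only [hc0] at hj ⊢
      simp only [List.length_set, List.length_replicate] at hj
      have hidx : PySem.List.pyIdx? ((List.replicate (n + 1).toNat (-1 : Int)).set kd 0).length destination = some kd := by
        simpa using hkd
      constructor
      · intro hc
        by_cases hjk : j = kd
        · subst hjk
          exact ⟨destination, by simp, hidx⟩
        · rw [List.getElem_set_ne (by omega), List.getElem_replicate] at hc
          omega
      · rintro ⟨x, hx, hxj⟩
        simp at hx
        subst hx
        rw [hidx] at hxj
        have : j = kd := by
          have := Option.some.inj hxj
          omega
        subst this
        rw [List.getElem_set_self (by simpa using hkdlt)]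
    · intro x hx
      simp at hx
      subst hx
      rw [hc0]
      exact ⟨kd, by simpa using hkd⟩
    · omega
  rw [harr]
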